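-- pv_equiv track=rewrite | github.com/rreinette/INFMDI721 | alexandre-lenoir/Lesson1/exo_cc_lesson_1.py | last2
-- ===== SOURCE A (Python) =====
-- def last2(string):
--     if len(string) < 2:
--         return 0
--     last2chars = string[-2:]
--     count = 0
--     for pos in range(len(string)-2):
--         count += string[pos:pos+2] == last2chars
--     return count
-- ===== SOURCE B (Python) =====
-- def last2(string):
--     if len(string) < 2:
--         return 0
--     last2chars = string[-2:]
--     count = 0
--     start = 0
--     while True:
--         idx = string.find(last2chars, start)
--         if idx == -1:
--             return count - 1
--         count += 1
--         start = idx + 1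
-- ===== Notes on version B (the rewrite author's own statement) =====
-- stated objective: alternative
-- what changed: Instead of comparing every adjacent two-char slice against string[-2:], B jumps from match to match with string.find(last2chars, start), counting overlapping occurrences of the trailing pair in the whole string and subtracting one for its self-match.
import Mathlib
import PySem

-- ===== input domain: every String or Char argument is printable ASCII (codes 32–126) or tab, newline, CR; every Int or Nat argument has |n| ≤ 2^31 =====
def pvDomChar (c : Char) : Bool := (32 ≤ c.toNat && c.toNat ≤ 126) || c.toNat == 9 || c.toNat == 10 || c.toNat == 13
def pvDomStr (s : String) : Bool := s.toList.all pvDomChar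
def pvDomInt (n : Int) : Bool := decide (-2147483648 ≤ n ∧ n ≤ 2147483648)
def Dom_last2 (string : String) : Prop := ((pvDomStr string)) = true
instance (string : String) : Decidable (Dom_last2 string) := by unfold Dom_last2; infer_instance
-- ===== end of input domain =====

-- B replaces A's per-position slice comparison with a find-driven loop that jumps
-- from match to match of the trailing pair, counting overlapping occurrences and
-- subtracting one for the self-match (alternative decomposition, same cost).


-- findFrom with a start strictly past the length is -1 (needed for the loop's termination)
theorem findFrom_past_len (cs sub : List Char) (k : Nat) (hk : cs.length < k) :
    PySem.Chars.findFrom cs sub (k : Int) none = -1 := by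
  unfold PySem.Chars.findFrom
  simp only
  rw [if_neg (show ¬((k : Int) < 0) from by omega),
    if_pos (show ((cs.length : Nat) : Int) < (k : Int) from by exact_mod_cast hk)]

-- start ≤ idx when findFrom from a nonnegative start does not fail
theorem findFrom_ge_start (cs sub : List Char) (k : Nat) (hk : k ≤ cs.length)
    (h : PySem.Chars.findFrom cs sub (k : Int) none ≠ -1) :
    (k : Int) ≤ PySem.Chars.findFrom cs sub (k : Int) none :=
  (PySem.Chars.findFrom_natCast_spec cs sub k hk h).1

-- ===== PORT A =====
-- string operations ported on code points via PySem.Chars (exact on the stated ASCII domain)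
def last2 (string : String) : Int :=
  let cs := string.toList
  if (PySem.Chars.len cs : Int) < 2 then 0
  else
    let last2chars := PySem.List.slice cs (some (-2)) none
    (PySem.List.pyRange 0 ((PySem.Chars.len cs : Int) - 2) 1).foldl
      (fun count pos =>
        count + (if PySem.List.slice cs (some pos) (some (pos + 2)) = last2chars then (1 : Int) else 0)) 0

-- ===== PORT B =====
-- the 'while True' loop: find the next occurrence from 'start', count it, restart at idx+1
def last2AltLoop (cs sub : List Char) (count : Int) (start : Nat) : Int :=
  let idx := PySem.Chars.findFrom cs sub (start : Int) none
  if h : idx = -1 then count - 1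
  else
    have hle : start ≤ cs.length := by
      by_contra hgt
      exact h (findFrom_past_len cs sub start (by omega))
    have : cs.length + 1 - (idx.toNat + 1) < cs.length + 1 - start := by
      have := findFrom_ge_start cs sub start hle h
      omega
    last2AltLoop cs sub (count + 1) (idx.toNat + 1)
termination_by cs.length + 1 - start

def last2_alt (string : String) : Int :=
  let cs := string.toList
  if (PySem.Chars.len cs : Int) < 2 then 0
  else
    let last2chars := PySem.List.slice cs (some (-2)) none
    last2AltLoop cs last2chars 0 0

-- ===== PRECONDITION & SPEC =====
def Spec_last2 (string : String) (out : Int) : Prop := out = last2_alt string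
instance (string : String) (out : Int) : Decidable (Spec_last2 string out) := by unfold Spec_last2; infer_instance

-- ===== CLAIM (what is proved, stated in full; the proofs are below) =====
def Claim_equal_last2 : Prop := ∀ (string : String), Dom_last2 string → Spec_last2 string (last2 string)

-- ===== LEMMAS AND PROOFS =====

-- the loop counts the positions i ∈ [start, cs.length) at which sub begins, minus one
theorem loop_eq (cs sub : List Char) (hsub : sub ≠ []) :
    ∀ fuel start count, start ≤ cs.length → cs.length - start ≤ fuel →
    last2AltLoop cs sub count start =
      count + (List.countP (fun i => decide (sub <+: cs.drop i)) (List.range' start (cs.length - start)) : Int) - 1 := by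
  intro fuel
  induction fuel with
  | zero =>
    intro start count h1 h2
    have hs : start = cs.length := by omega
    rw [last2AltLoop]
    simp only
    by_cases h : PySem.Chars.findFrom cs sub (start : Int) none = -1
    · rw [dif_pos h]
      simp [hs]
    · exfalso
      obtain ⟨hge, hpre, -⟩ := PySem.Chars.findFrom_natCast_spec cs sub start h1 h
      subst hs
      rw [List.drop_eq_nil_of_le (by omega)] at hpre
      rw [List.prefix_nil] at hpre
      exact hsub hpre
  | succ f ih =>
    intro start count h1 h2
    rw [last2AltLoop]
    simp only
    by_cases h : PySem.Chars.findFrom cs sub (start : Int) none = -1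
    · rw [dif_pos h]
      have hnone : ∀ i, start ≤ i → ¬ sub <+: cs.drop i := by
        have hni := (PySem.Chars.findFrom_natCast_eq_neg_one_iff cs sub start h1).mp h
        intro i hi hp
        apply hni
        have : cs.drop i = (cs.drop start).drop (i - start) := by
          rw [List.drop_drop]; congr 1; omega
        rw [this] at hp
        exact hp.isInfix.trans (List.drop_suffix _ _).isInfix
      have hz : List.countP (fun i => decide (sub <+: cs.drop i)) (List.range' start (cs.length - start)) = 0 := by
        rw [List.countP_eq_zero]
        intro i hi
        obtain ⟨j, hj, hij⟩ := List.mem_range'.mp hi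
        simp only [decide_eq_true_eq]
        exact hnone i (by omega)
      rw [hz]; push_cast; ring
    · rw [dif_neg h]
      obtain ⟨hge, hpre, hmin⟩ := PySem.Chars.findFrom_natCast_spec cs sub start h1 h
      set m := (PySem.Chars.findFrom cs sub (start : Int) none).toNat with hm
      have hgen : start ≤ m := by omega
      have hmlt : m + 1 ≤ cs.length := by
        have hl := hpre.length_le
        have hd : (cs.drop m).length = cs.length - m := by simp
        rcases sub with _ | ⟨c, t⟩
        · exact absurd rfl hsub
        · simp [hd] at hl; omega
      rw [ih (m + 1) (count + 1) hmlt (by omega)]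
      have hsplit : List.range' start (cs.length - start)
          = List.range' start (m - start) ++ m :: List.range' (m + 1) (cs.length - (m + 1)) := by
        have h3 : cs.length - start = (m - start) + (1 + (cs.length - (m + 1))) := by omega
        rw [h3, ← List.range'_append]
        congr 1
        have h4 : start + 1 * (m - start) = m := by omega
        rw [h4, Nat.add_comm 1 (cs.length - (m + 1)), List.range'_succ]
      rw [hsplit]
      rw [List.countP_append, List.countP_cons]
      have hz : List.countP (fun i => decide (sub <+: cs.drop i)) (List.range' start (m - start)) = 0 := by
        rw [List.countP_eq_zero]
        intro i hi
        obtain ⟨j, hj, hij⟩ := List.mem_range'.mp hi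
        simp only [decide_eq_true_eq]
        exact hmin i (by omega) (by omega)
      rw [hz]
      simp only [hpre, decide_true, if_pos]
      push_cast
      ring

theorem main (s : String) : last2 s = last2_alt s := by
  unfold last2 last2_alt
  set cs := s.toList with hcs
  by_cases hlt : (PySem.Chars.len cs : Int) < 2
  · have h1 : cs.length ≤ 1 := by simp [PySem.Chars.len] at hlt; omega
    simp [h1]
  · simp only [hlt, if_false]
    have hn : 2 ≤ cs.length := by simp [PySem.Chars.len] at hlt; omega
    set n := cs.length with hnn
    have hdrop : ∀ i, i + 2 ≤ n → List.take 2 (List.drop i cs) = [cs.getD i 'a', cs.getD (i+1) 'a'] := by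
      intro i hi
      have h1 : i < cs.length := by omega
      have h2 : i + 1 < cs.length := by omega
      rw [List.getD_eq_getElem cs 'a' h1, List.getD_eq_getElem cs 'a' h2,
        List.drop_eq_getElem_cons h1, List.drop_eq_getElem_cons h2]
      rfl
    have hlast : PySem.List.slice cs (some (-2)) none = [cs.getD (n-2) 'a', cs.getD (n-1) 'a'] := by
      rw [PySem.List.slice_from_neg_ofNat cs 2 (by omega)]
      have h3 : (n - 2) + 1 = n - 1 := by omega
      have := hdrop (n-2) (by omega)
      rw [h3] at this
      rw [← this]
      exact (List.take_of_length_le (by simp; omega)).symm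
    set sub := PySem.List.slice cs (some (-2)) none with hsubdef
    set q : Nat → Bool := fun i =>
      (cs.getD i 'a' == cs.getD (n-2) 'a') && (cs.getD (i+1) 'a' == cs.getD (n-1) 'a') with hq
    -- ===== A side =====
    have hcast : ((n : Int)) - 2 = ((n - 2 : Nat) : Int) := by omega
    have hbody : (fun (count : Int) (pos : Int) =>
          count + if PySem.List.slice cs (some pos) (some (pos + 2)) = sub then (1:Int) else 0)
        = (fun count pos => if PySem.List.slice cs (some pos) (some (pos + 2)) = sub then count + 1 else count) := by
      funext c p; split <;> simp
    simp only [PySem.Chars.len_eq]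
    rw [hcast, PySem.List.pyRange_zero_natCast, hbody, PySem.List.foldl_ite_add_one]
    rw [List.countP_map]
    have hA : List.countP
          ((fun pos => decide (PySem.List.slice cs (some pos) (some (pos + 2)) = sub)) ∘ (fun k : Nat => (k : Int)))
          (List.range (n - 2)) = List.countP q (List.range (n - 2)) := by
      apply List.countP_congr
      intro i hi
      have hi' : i < n - 2 := List.mem_range.mp hi
      have h2 : ((i : Int)) + 2 = ((i + 2 : Nat) : Int) := by push_cast; ring
      simp only [Function.comp, h2, PySem.List.slice_natCast, hlast, Nat.add_sub_cancel_left]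
      rw [hdrop i (by omega)]
      simp [hq]
    rw [hA]
    -- ===== B side =====
    have hP : ∀ i, i < n → (decide (sub <+: cs.drop i) = if i ≤ n - 2 then q i else false) := by
      intro i hi
      by_cases hile : i ≤ n - 2
      · rw [if_pos hile, hlast]
        have hiff : ([cs.getD (n-2) 'a', cs.getD (n-1) 'a'] <+: cs.drop i)
            ↔ (cs.getD i 'a' = cs.getD (n-2) 'a' ∧ cs.getD (i+1) 'a' = cs.getD (n-1) 'a') := by
          rw [List.prefix_iff_eq_take]
          have hl2 : ([cs.getD (n-2) 'a', cs.getD (n-1) 'a'] : List Char).length = 2 := rfl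
          rw [hl2, hdrop i (by omega)]
          constructor
          · intro hpe
            injection hpe with h1 h2
            injection h2 with h2 _
            exact ⟨h1.symm, h2.symm⟩
          · rintro ⟨ha, hb⟩
            rw [ha, hb]
        show decide _ = q i
        simp only [hq]
        exact Bool.eq_iff_iff.mpr (by simpa using hiff)
      · rw [if_neg hile]
        have hno : ¬ (sub <+: cs.drop i) := by
          intro hp
          have hl := hp.length_le
          rw [hlast] at hl
          simp at hl
          omega
        simp [hno]
    rw [loop_eq cs sub (by rw [hlast]; simp) n 0 0 (by omega) (by omega)]
    have hr0 : List.range' 0 (n - 0) = List.range n := by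
      rw [List.range_eq_range']; congr 1
    rw [Nat.sub_zero] at hr0 ⊢
    rw [hr0]
    have hsplitn : List.range n = List.range (n - 2) ++ [n-2, n-1] := by
      have h5 : List.range n = List.range ((n - 2) + 1 + 1) := by congr 1; omega
      have h6 : (n - 2) + 1 = n - 1 := by omega
      rw [h5, List.range_succ, List.range_succ, List.append_assoc, h6]
      rfl
    rw [hsplitn, List.countP_append]
    have hc1 : List.countP (fun i => decide (sub <+: cs.drop i)) (List.range (n - 2))
        = List.countP q (List.range (n - 2)) := by
      apply List.countP_congr
      intro i hi
      have hi' : i < n - 2 := List.mem_range.mp hi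
      rw [hP i (by omega), if_pos (by omega)]
    have hend : List.countP (fun i => decide (sub <+: cs.drop i)) [n-2, n-1] = 1 := by
      have e2 : decide (sub <+: cs.drop (n-2)) = true := by
        rw [hP (n-2) (by omega), if_pos (le_refl _)]
        simp [hq, show n-2+1 = n-1 from by omega]
      have e3 : decide (sub <+: cs.drop (n-1)) = false := by
        rw [hP (n-1) (by omega), if_neg (by omega)]
      simp [e2, e3]
    rw [hc1, hend]
    push_cast
    ring

-- ===== VERDICT (by name: the statement is the Claim_ definition above) =====
theorem last2_spec : Claim_equal_last2 := by
  intro s _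
  unfold Spec_last2
  exact main s
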